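-- pv_equiv track=rewrite | github.com/hadiasghari/calledearth-django | earth/views.py | maybe_expand_ftext
-- ===== SOURCE A (Python) =====
-- def maybe_expand_ftext(ftext):
--     # if there is a hidden command in the entered text prompt, expand it with test data....
--     if not ftext.startswith("!@#") and not ftext.startswith("qwe"):
--         return [ftext]
--     try:
--         n = int(ftext.replace("!@#", "").replace("qwe", ""))
--     except:
--         return [ftext]
--
--     # return test data!
--     test_strings = ["There were many words for her.",
-- 	      "Zoinks",		"Crikey", "None of them were more than sound.",
-- 	      "By coincidence, or by choice, or by miraculous design, " \
-- 	            + "she settled into such a particular orbit around the sun that after the moon had been knocked from her belly " \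
-- 	                  + "and pulled the water into sapphire blue oceans " \
-- 	                        + "the fire and brimstone had simmered, and the land had stopped buckling and heaving with such relentless vigor, " \
-- 	                              + "she whispered a secret code amongst the atoms, and life was born.",
-- 	      "She rocked her new creation and spun and danced around the bright sun as her children multiplied in number, wisdom, and beauty." ,
--           "Oh my God",		"WTF",
-- 	       "The End!"]
--     lt = []
--     for i in range(n):
--         t = test_strings[i%len(test_strings)]
--         lt.append(t[:116] + "___!")  # add max 120 chars
--     return lt
-- ===== SOURCE B (Python) =====
-- def maybe_expand_ftext(ftext):
--     # B: precompute the truncated table once, then build the result by cyclic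
--     # replication and slicing instead of a per-index modulo loop (simpler).
--     if not ftext.startswith("!@#") and not ftext.startswith("qwe"):
--         return [ftext]
--     try:
--         n = int(ftext.replace("!@#", "").replace("qwe", ""))
--     except:
--         return [ftext]
--
--     test_strings = ["There were many words for her.",
-- 	      "Zoinks",		"Crikey", "None of them were more than sound.",
-- 	      "By coincidence, or by choice, or by miraculous design, " \
-- 	            + "she settled into such a particular orbit around the sun that after the moon had been knocked from her belly " \
-- 	                  + "and pulled the water into sapphire blue oceans " \
-- 	                        + "the fire and brimstone had simmered, and the land had stopped buckling and heaving with such relentless vigor, " \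
-- 	                              + "she whispered a secret code amongst the atoms, and life was born.",
-- 	      "She rocked her new creation and spun and danced around the bright sun as her children multiplied in number, wisdom, and beauty." ,
--           "Oh my God",		"WTF",
-- 	       "The End!"]
--     truncated = [s[:116] + "___!" for s in test_strings]
--     if n <= 0:
--         return []
--     return (truncated * (n // len(truncated) + 1))[:n]
-- ===== Notes on version B (the rewrite author's own statement) =====
-- stated objective: simpler
-- what changed: B keeps the guards and int-parse, but precomputes the truncated table once and builds the result by replicating that list n//8+1 times and slicing to n, replacing A's per-index i % len(test_strings) accumulation loop.
import Mathlib
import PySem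

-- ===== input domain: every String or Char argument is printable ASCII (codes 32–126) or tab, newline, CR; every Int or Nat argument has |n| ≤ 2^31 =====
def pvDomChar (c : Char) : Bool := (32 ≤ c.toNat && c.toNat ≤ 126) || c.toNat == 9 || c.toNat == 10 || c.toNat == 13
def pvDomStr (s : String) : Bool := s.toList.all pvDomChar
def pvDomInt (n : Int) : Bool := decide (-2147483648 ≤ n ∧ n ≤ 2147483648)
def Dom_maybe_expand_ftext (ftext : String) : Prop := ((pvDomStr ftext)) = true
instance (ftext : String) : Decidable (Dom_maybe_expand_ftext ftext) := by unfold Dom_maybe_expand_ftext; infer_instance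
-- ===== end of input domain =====

set_option maxHeartbeats 1000000


-- B builds the repeating test pattern once (truncate each string, replicate the list
-- cyclically, cut to length n) instead of A's per-index i % len loop; objective: simpler.

-- shared constant: the module's test_strings literal
def pvTestStrings : List String :=
  ["There were many words for her.",
   "Zoinks", "Crikey", "None of them were more than sound.",
   "By coincidence, or by choice, or by miraculous design, "
     ++ "she settled into such a particular orbit around the sun that after the moon had been knocked from her belly "
     ++ "and pulled the water into sapphire blue oceans "
     ++ "the fire and brimstone had simmered, and the land had stopped buckling and heaving with such relentless vigor, "
     ++ "she whispered a secret code amongst the atoms, and life was born.",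
   "She rocked her new creation and spun and danced around the bright sun as her children multiplied in number, wisdom, and beauty.",
   "Oh my God", "WTF",
   "The End!"]

-- ===== PORT A =====
def maybe_expand_ftext (ftext : String) : List String :=
  if ¬ (PySem.Str.startswith ftext "!@#") ∧ ¬ (PySem.Str.startswith ftext "qwe") then
    [ftext]
  else
    match PySem.Int.ofStr? (PySem.Str.replace (PySem.Str.replace ftext "!@#" "") "qwe" "") with
    | none => [ftext]
    | some n =>
      let test_strings := pvTestStrings
      (PySem.List.pyRange 0 n 1).foldl
        (fun lt i =>
          let t := PySem.List.pyGetD test_strings (PySem.Int.mod i (test_strings.length : Int)) ""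
          lt ++ [PySem.Str.slice t none (some 116) ++ "___!"])
        []

-- ===== PORT B =====
def maybe_expand_ftext_alt (ftext : String) : List String :=
  if ¬ (PySem.Str.startswith ftext "!@#") ∧ ¬ (PySem.Str.startswith ftext "qwe") then
    [ftext]
  else
    match PySem.Int.ofStr? (PySem.Str.replace (PySem.Str.replace ftext "!@#" "") "qwe" "") with
    | none => [ftext]
    | some n =>
      let truncated := pvTestStrings.map (fun s => PySem.Str.slice s none (some 116) ++ "___!")
      if n ≤ 0 then []
      else
        PySem.List.slice
          ((List.replicate ((PySem.Int.floordiv n (truncated.length : Int)).toNat + 1) truncated).flatten)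
          none (some n)

-- ===== PRECONDITION & SPEC =====
def Spec_maybe_expand_ftext (ftext : String) (out : List String) : Prop := out = maybe_expand_ftext_alt ftext
instance (ftext : String) (out : List String) : Decidable (Spec_maybe_expand_ftext ftext out) := by unfold Spec_maybe_expand_ftext; infer_instance

-- ===== CLAIM (what is proved, stated in full; the proofs are below) =====
def Claim_equal_maybe_expand_ftext : Prop := ∀ (ftext : String), Dom_maybe_expand_ftext ftext → Spec_maybe_expand_ftext ftext (maybe_expand_ftext ftext)

-- ===== LEMMAS AND PROOFS =====

-- append-singleton foldl is map
theorem pv_foldl_append_map {α β : Type} (f : α → β) (l : List α) (init : List β) :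
    l.foldl (fun acc x => acc ++ [f x]) init = init ++ l.map f := by
  induction l generalizing init with
  | nil => simp
  | cons x xs ih => simp [List.foldl, ih, List.append_assoc]

-- the first L.length entries of the cyclic pattern are L itself
theorem pv_map_getD_range {α : Type} (L : List α) (d : α) :
    (List.range L.length).map (fun j => L.getD j d) = L := by
  apply List.ext_getElem
  · simp
  · intro i h1 h2
    simp [List.getD_eq_getElem?_getD, h2]

-- flatten of q copies of L is the cyclic map over range (q * L.length)
theorem pv_flatten_replicate_cyc {α : Type} (L : List α) (d : α) (q : Nat) :
    (List.replicate q L).flatten = (List.range (q * L.length)).map (fun k => L.getD (k % L.length) d) := by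
  induction q with
  | zero => simp
  | succ q ih =>
    have hchunk : (List.range L.length).map (fun j => L.getD ((q * L.length + j) % L.length) d) = L := by
      rcases Nat.eq_zero_or_pos L.length with h0 | hpos
      · simp [List.length_eq_zero_iff.mp h0]
      · calc (List.range L.length).map (fun j => L.getD ((q * L.length + j) % L.length) d)
            = (List.range L.length).map (fun j => L.getD j d) := by
              apply List.map_congr_left; intro j hj
              rw [Nat.add_comm, Nat.add_mul_mod_self_right, Nat.mod_eq_of_lt (List.mem_range.mp hj)]
          _ = L := pv_map_getD_range L d
    rw [List.replicate_succ', List.flatten_append, ih, Nat.succ_mul, List.range_add, List.map_append]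
    congr 1
    simp only [List.flatten_cons, List.flatten_nil, List.append_nil, List.map_map]
    exact hchunk.symm

theorem maybe_expand_ftext_spec : Claim_equal_maybe_expand_ftext := by
  intro ftext _
  unfold Spec_maybe_expand_ftext maybe_expand_ftext maybe_expand_ftext_alt
  split
  · rfl
  · cases hparse : PySem.Int.ofStr? (PySem.Str.replace (PySem.Str.replace ftext "!@#" "") "qwe" "") with
    | none => rfl
    | some n =>
      simp only []
      by_cases hn : n ≤ 0
      · rw [if_pos hn, PySem.List.pyRange_one_eq_nil (by omega), List.foldl_nil]
      · rw [if_neg hn]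
        -- abbreviations (generalize the constant list so rewriting stays cheap)
        have hTlen : pvTestStrings.length = 9 := rfl
        generalize hT : pvTestStrings = T
        rw [hT] at hTlen
        set f : String → String := fun s => PySem.Str.slice s none (some 116) ++ "___!" with hf
        set m : Nat := n.toNat with hm
        have hnm : n = (m : Int) := by omega
        have hmpos : 0 < m := by omega
        -- A side: foldl → map over range m
        rw [pv_foldl_append_map (fun i => f (PySem.List.pyGetD T (PySem.Int.mod i (T.length : Int)) "")) _ []]
        rw [List.nil_append, PySem.List.pyRange_one, hnm]
        simp only [sub_zero, Int.toNat_natCast, zero_add, List.map_map]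
        -- B side: slice → take, floordiv → Nat division
        have hq : (PySem.Int.floordiv ((m : Nat) : Int) (((T.map f).length : Nat) : Int)).toNat + 1 = m / 9 + 1 := by
          rw [PySem.Int.floordiv_eq_ediv_of_pos (by simp [hTlen])]
          simp only [List.length_map, hTlen]
          omega
        rw [hq, PySem.List.slice_to_natCast]
        rw [pv_flatten_replicate_cyc (T.map f) (f "") (m / 9 + 1)]
        simp only [List.length_map, hTlen]
        have hle : m ≤ (m / 9 + 1) * 9 := by omega
        rw [← List.map_take, List.take_range, Nat.min_eq_left hle]
        apply List.map_congr_left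
        intro k hk
        have hk8 : k % 9 < 9 := by omega
        have hcast : PySem.Int.mod ((k : Nat) : Int) ((9 : Nat) : Int) = ((k % 9 : Nat) : Int) :=
          PySem.Int.mod_natCast k 9
        simp only [Function.comp]
        rw [hcast, PySem.List.pyGetD_natCast]
        rw [List.getD_eq_getElem?_getD, List.getD_eq_getElem?_getD,
            List.getElem?_eq_getElem (by omega : k % 9 < T.length),
            List.getElem?_eq_getElem (by simp [hTlen]; omega : k % 9 < (T.map f).length)]
        simp
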